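-- pv_equiv track=rewrite | github.com/danielstarodubtsev/Python-3-QR-code-creator | QR code creator (stable 1.1.0).py | add_leveling_patterns
-- ===== SOURCE A (Python) =====
-- def add_leveling_patterns(qr, version):
--     '''
--     Creates smaller squares in different places
--     '''
--
--     all_coords = {1: [],
--               2: [18],
--               3: [22],
--               4: [26],
--               5: [30],
--               6: [34],
--               7: [6, 22, 38],
--               8: [6, 24, 42],
--               9: [6, 26, 46],
--               10: [6, 28, 50],
--               11: [6, 30, 54],
--               12: [6, 32, 58],
--               13: [6, 34, 62],
--               14: [6, 26, 46, 66],
--               15: [6, 26, 48, 70],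
--               16: [6, 26, 50, 74],
--               17: [6, 30, 54, 78],
--               18: [6, 30, 56, 82],
--               19: [6, 30, 58, 86],
--               20: [6, 34, 62, 90],
--               21: [6, 28, 50, 72, 94],
--               22: [6, 26, 50, 74, 98],
--               23: [6, 30, 54, 78, 102],
--               24: [6, 28, 54, 80, 106],
--               25: [6, 32, 58, 84, 110],
--               26: [6, 30, 58, 86, 114],
--               27: [6, 34, 62, 90, 118],
--               28: [6, 26, 50, 74, 98, 122],
--               29: [6, 30, 54, 78, 102, 126],
--               30: [6, 26, 52, 78, 104, 130],
--               31: [6, 30, 56, 82, 108, 134],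
--               32: [6, 34, 60, 86, 112, 138],
--               33: [6, 30, 58, 86, 114, 142],
--               34: [6, 34, 62, 90, 118, 146],
--               35: [6, 30, 54, 78, 102, 126, 150],
--               36: [6, 24, 50, 76, 102, 128, 154],
--               37: [6, 28, 54, 80, 106, 132, 158],
--               38: [6, 32, 58, 84, 110, 136, 162],
--               39: [6, 26, 54, 82, 110, 138, 166],
--               40: [6, 30, 58, 86, 114, 142, 170]}
--
--     coords = all_coords[version]
--     places = []
--
--     for x in coords:
--         for y in coords:
--             places.append((x, y))
--
--     if version >= 7:
--         places.remove((coords[0], coords[0]))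
--         places.remove((coords[-1], coords[0]))
--         places.remove((coords[0], coords[-1]))
--
--     for place in places:
--         x, y = place
--         qr[y][x] = 1
--
--         for i in range(-1, 2):
--             for j in range(-1, 2):
--                 if i or j:
--                     qr[y + i][x + j] = 0
--
--         for i in range(-2, 3):
--             for j in range(-2, 3):
--                 if abs(i) == 2 or abs(j) == 2:
--                     qr[y + i][x + j] = 1
--
--     return qr
-- ===== SOURCE B (Python) =====
-- def add_leveling_patterns(qr, version):
--     '''
--     Creates smaller squares in different places
--     '''
--
--     all_coords = {1: [],
--               2: [18],
--               3: [22],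
--               4: [26],
--               5: [30],
--               6: [34],
--               7: [6, 22, 38],
--               8: [6, 24, 42],
--               9: [6, 26, 46],
--               10: [6, 28, 50],
--               11: [6, 30, 54],
--               12: [6, 32, 58],
--               13: [6, 34, 62],
--               14: [6, 26, 46, 66],
--               15: [6, 26, 48, 70],
--               16: [6, 26, 50, 74],
--               17: [6, 30, 54, 78],
--               18: [6, 30, 56, 82],
--               19: [6, 30, 58, 86],
--               20: [6, 34, 62, 90],
--               21: [6, 28, 50, 72, 94],
--               22: [6, 26, 50, 74, 98],
--               23: [6, 30, 54, 78, 102],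
--               24: [6, 28, 54, 80, 106],
--               25: [6, 32, 58, 84, 110],
--               26: [6, 30, 58, 86, 114],
--               27: [6, 34, 62, 90, 118],
--               28: [6, 26, 50, 74, 98, 122],
--               29: [6, 30, 54, 78, 102, 126],
--               30: [6, 26, 52, 78, 104, 130],
--               31: [6, 30, 56, 82, 108, 134],
--               32: [6, 34, 60, 86, 112, 138],
--               33: [6, 30, 58, 86, 114, 142],
--               34: [6, 34, 62, 90, 118, 146],
--               35: [6, 30, 54, 78, 102, 126, 150],
--               36: [6, 24, 50, 76, 102, 128, 154],
--               37: [6, 28, 54, 80, 106, 132, 158],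
--               38: [6, 32, 58, 84, 110, 136, 162],
--               39: [6, 26, 54, 82, 110, 138, 166],
--               40: [6, 30, 58, 86, 114, 142, 170]}
--
--     coords = all_coords[version]
--     n = len(coords)
--
--     # Kept alignment centres: the coordinate product minus (for version >= 7) the three
--     # centres that collide with the finder patterns, identified by index.
--     centers = [(coords[xi], coords[yi])
--                for xi in range(n) for yi in range(n)
--                if not (version >= 7 and ((xi == 0 and (yi == 0 or yi == n - 1))
--                                          or (xi == n - 1 and yi == 0)))]
--
--     # GATHER instead of scatter: rebuild each touched row, computing every cell from its
--     # Chebyshev distance to the (unique, squares are disjoint) nearby centre, if any.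
--     def value(r, c, old):
--         for x, y in centers:
--             d = max(abs(r - y), abs(c - x))
--             if d <= 2:
--                 return 0 if d == 1 else 1
--         return old
--
--     for r in sorted({y + i for _, y in centers for i in range(-2, 3)}):
--         qr[r] = [value(r, c, old) for c, old in enumerate(qr[r])]
--
--     return qr
-- ===== Notes on version B (the rewrite author's own statement) =====
-- stated objective: alternative
-- what changed: A scatters: it builds a places list, deletes three corners with list.remove and stamps each alignment square with three in-place write passes per centre; B gathers: it keeps the centres as an index-filtered comprehension, computes the set of touched row indices, and rebuilds each touched row in one comprehension, deriving every cell from its Chebyshev distance to the (unique, squares are disjoint) nearby centre.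
import Mathlib
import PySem

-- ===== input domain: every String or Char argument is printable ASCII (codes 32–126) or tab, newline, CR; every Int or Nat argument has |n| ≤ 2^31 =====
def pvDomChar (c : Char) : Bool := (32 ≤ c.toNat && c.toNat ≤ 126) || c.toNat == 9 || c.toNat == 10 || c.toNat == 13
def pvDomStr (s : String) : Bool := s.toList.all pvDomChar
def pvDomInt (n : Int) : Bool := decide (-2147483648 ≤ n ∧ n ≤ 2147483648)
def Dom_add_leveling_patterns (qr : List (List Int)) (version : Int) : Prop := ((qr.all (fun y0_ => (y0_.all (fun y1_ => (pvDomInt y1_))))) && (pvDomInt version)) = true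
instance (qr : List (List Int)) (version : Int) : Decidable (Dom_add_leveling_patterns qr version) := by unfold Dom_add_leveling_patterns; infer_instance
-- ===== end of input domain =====

-- B replaces A's scatter (build a places list, delete three corners with list.remove,
-- stamp three in-place write passes around each centre) by a gather: it keeps the centres
-- as an index-filtered comprehension and rebuilds each touched ROW in one comprehension,
-- computing every cell from its Chebyshev distance to the (unique, squares are disjoint)
-- nearby centre (objective: alternative).  A mutates cells in place, B replaces whole row
-- objects of qr; the equivalence proved here is about the returned grid only.

-- the alignment-coordinate table shared by both Pythons (a data constant)
def pvCoordsTable : List (Int × List Int) :=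
  [(1, []), (2, [18]), (3, [22]), (4, [26]), (5, [30]), (6, [34]),
   (7, [6, 22, 38]), (8, [6, 24, 42]), (9, [6, 26, 46]), (10, [6, 28, 50]),
   (11, [6, 30, 54]), (12, [6, 32, 58]), (13, [6, 34, 62]), (14, [6, 26, 46, 66]),
   (15, [6, 26, 48, 70]), (16, [6, 26, 50, 74]), (17, [6, 30, 54, 78]),
   (18, [6, 30, 56, 82]), (19, [6, 30, 58, 86]), (20, [6, 34, 62, 90]),
   (21, [6, 28, 50, 72, 94]), (22, [6, 26, 50, 74, 98]), (23, [6, 30, 54, 78, 102]),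
   (24, [6, 28, 54, 80, 106]), (25, [6, 32, 58, 84, 110]), (26, [6, 30, 58, 86, 114]),
   (27, [6, 34, 62, 90, 118]), (28, [6, 26, 50, 74, 98, 122]),
   (29, [6, 30, 54, 78, 102, 126]), (30, [6, 26, 52, 78, 104, 130]),
   (31, [6, 30, 56, 82, 108, 134]), (32, [6, 34, 60, 86, 112, 138]),
   (33, [6, 30, 58, 86, 114, 142]), (34, [6, 34, 62, 90, 118, 146]),
   (35, [6, 30, 54, 78, 102, 126, 150]), (36, [6, 24, 50, 76, 102, 128, 154]),
   (37, [6, 28, 54, 80, 106, 132, 158]), (38, [6, 32, 58, 84, 110, 136, 162]),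
   (39, [6, 26, 54, 82, 110, 138, 166]), (40, [6, 30, 58, 86, 114, 142, 170])]

-- all_coords[version]; KeyError (= the .getD default) is excluded by Pre_
def pvCoords (version : Int) : List Int :=
  (PySem.Dict.get? (PySem.Dict.ofList pvCoordsTable) version).getD []

-- qr[y][x] = v.  Under Pre_ every written index is nonnegative and in range, so Python's
-- negative-index wraparound and IndexError cannot occur and List.modify/List.set are exact.
def pvSetCell (q : List (List Int)) (y x v : Int) : List (List Int) :=
  q.modify y.toNat (fun row => row.set x.toNat v)

-- ===== PORT A =====
-- the body of A's final 'for place in places' loop: three stamping passes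
def pvStampA (q : List (List Int)) (place : Int × Int) : List (List Int) :=
  let x := place.1
  let y := place.2
  let q := pvSetCell q y x 1
  let q := (PySem.List.pyRange (-1) 2 1).foldl (fun q i =>
    (PySem.List.pyRange (-1) 2 1).foldl (fun q j =>
      if i != 0 || j != 0 then pvSetCell q (y + i) (x + j) 0 else q) q) q
  (PySem.List.pyRange (-2) 3 1).foldl (fun q i =>
    (PySem.List.pyRange (-2) 3 1).foldl (fun q j =>
      if i.natAbs == 2 || j.natAbs == 2 then pvSetCell q (y + i) (x + j) 1 else q) q) q

-- builds A's places list; for version >= 7 coords is nonempty and contains the three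
-- corners, so coords[0]/coords[-1] cannot raise and list.remove cannot raise ValueError
-- (the .getD/.headD/.getLastD defaults are never reached inside Pre_)
def pvPlacesA (version : Int) : List (Int × Int) :=
  let coords := pvCoords version
  let places := coords.foldl (fun acc x => coords.foldl (fun acc y => acc ++ [(x, y)]) acc) []
  if 7 ≤ version then
    let c0 := coords.headD 0
    let cl := coords.getLastD 0
    let places := (PySem.List.remove? places (c0, c0)).getD places
    let places := (PySem.List.remove? places (cl, c0)).getD places
    (PySem.List.remove? places (c0, cl)).getD places
  else places

def add_leveling_patterns (qr : List (List Int)) (version : Int) : List (List Int) :=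
  (pvPlacesA version).foldl pvStampA qr

-- ===== PORT B =====
-- B's centers comprehension: the coordinate product minus (for version >= 7) the three
-- finder-pattern corners, identified by index (coords[xi] is always in range: .getD 0 is
-- never reached)
def pvCentersB (version : Int) : List (Int × Int) :=
  let coords := pvCoords version
  let n : Int := coords.length
  (PySem.List.pyRange 0 n 1).flatMap (fun xi =>
    ((PySem.List.pyRange 0 n 1).filter (fun yi =>
        !(7 ≤ version && ((xi == 0 && (yi == 0 || yi == n - 1)) || (xi == n - 1 && yi == 0))))).map
      (fun yi => (PySem.List.pyGetD coords xi 0, PySem.List.pyGetD coords yi 0)))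

-- B's value(r, c, old): scan the centers for one within Chebyshev distance 2
def pvValueB : List (Int × Int) → Int → Int → Int → Int
  | [], _, _, old => old
  | (x, y) :: t, r, c, old =>
    let d : Int := max ((r - y).natAbs : Int) ((c - x).natAbs : Int)
    if d ≤ 2 then (if d == 1 then 0 else 1) else pvValueB t r c old

-- the touched row indices: sorted({y + i for _, y in centers for i in range(-2, 3)})
def pvTouchB (centers : List (Int × Int)) : List Int :=
  PySem.List.sorted
    (PySem.Set.ofList (centers.flatMap (fun p =>
      (PySem.List.pyRange (-2) 3 1).map (fun i => p.2 + i))))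
    (fun x => x) false

-- for each touched row r: qr[r] = [value(r, c, old) for c, old in enumerate(qr[r])];
-- r is a nonnegative in-range index under Pre_, so List.modify is exact there
def add_leveling_patterns_alt (qr : List (List Int)) (version : Int) : List (List Int) :=
  (pvTouchB (pvCentersB version)).foldl (fun q r =>
    q.modify r.toNat (fun row =>
      (PySem.List.enumerate row).map (fun cold =>
        pvValueB (pvCentersB version) r cold.1 cold.2))) qr

-- ===== PRECONDITION & SPEC =====
-- the largest row/column index the patterns of this version touch, plus one
def pvNeed (version : Int) : Int :=
  ((pvCoordsTable.lookup version).getD []).foldr max (-3) + 3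

-- Pre_ excludes versions outside 1..40 (KeyError on the coordinate table) and grids too
-- small for the patterns of the version (IndexError on a written cell).  Requiring EVERY
-- row to be long enough is slightly stronger than A needs: rows lying between the
-- pattern bands are never indexed, so A also returns on grids whose untouched rows are
-- shorter (and B returns the same grid there, see the cites).
def Pre_add_leveling_patterns (qr : List (List Int)) (version : Int) : Prop :=
  1 ≤ version ∧ version ≤ 40 ∧ pvNeed version ≤ (qr.length : Int) ∧
    ∀ row ∈ qr, pvNeed version ≤ (row.length : Int)
instance (qr : List (List Int)) (version : Int) : Decidable (Pre_add_leveling_patterns qr version) := by unfold Pre_add_leveling_patterns; infer_instance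

def pvWitness_add_leveling_patterns : List (List Int) × Int := ([], 1)

def Spec_add_leveling_patterns (qr : List (List Int)) (version : Int) (out : List (List Int)) : Prop := out = add_leveling_patterns_alt qr version
instance (qr : List (List Int)) (version : Int) (out : List (List Int)) : Decidable (Spec_add_leveling_patterns qr version out) := by unfold Spec_add_leveling_patterns; infer_instance

-- ===== CLAIM (what is proved, stated in full; the proofs are below) =====
def Claim_equal_add_leveling_patterns : Prop := ∀ (qr : List (List Int)) (version : Int), Dom_add_leveling_patterns qr version → Pre_add_leveling_patterns qr version → Spec_add_leveling_patterns qr version (add_leveling_patterns qr version)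

-- ===== LEMMAS AND PROOFS =====

-- cell (r, c) of a grid
def pvCell (q : List (List Int)) (r c : Nat) : Option Int := q[r]?.bind (fun row => row[c]?)

-- the alignment-square pattern value at offset (i, j) from a centre
def pvPat (i j : Int) : Int := if max i.natAbs j.natAbs == 1 then 0 else 1

-- cell (r, c) lies within the 5x5 square of centre p = (x, y)
def pvNearb (p : Int × Int) (r c : Nat) : Bool :=
  max ((r : Int) - p.2).natAbs ((c : Int) - p.1).natAbs ≤ 2

-- the 25 writes of A's three stamping passes, in A's order: centre, ring, border
def pvWrA : List (Int × Int × Int) :=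
  [(0, 0, 1),
   (-1, -1, 0), (-1, 0, 0), (-1, 1, 0), (0, -1, 0), (0, 1, 0), (1, -1, 0), (1, 0, 0), (1, 1, 0),
   (-2, -2, 1), (-2, -1, 1), (-2, 0, 1), (-2, 1, 1), (-2, 2, 1),
   (-1, -2, 1), (-1, 2, 1), (0, -2, 1), (0, 2, 1), (1, -2, 1), (1, 2, 1),
   (2, -2, 1), (2, -1, 1), (2, 0, 1), (2, 1, 1), (2, 2, 1)]

def pvApplyW (x y : Int) (q : List (List Int)) (w : Int × Int × Int) : List (List Int) :=
  pvSetCell q (y + w.1) (x + w.2.1) w.2.2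

lemma pvRange_m1 : PySem.List.pyRange (-1) 2 1 = [-1, 0, 1] := by decide

lemma pvRange_m2 : PySem.List.pyRange (-2) 3 1 = [-2, -1, 0, 1, 2] := by decide

lemma pvStampA_eq_fold (q : List (List Int)) (x y : Int) :
    pvStampA q (x, y) = pvWrA.foldl (pvApplyW x y) q := by
  simp [pvStampA, pvApplyW, pvWrA, pvRange_m1, pvRange_m2]

lemma pvWr_bounds : ∀ w ∈ pvWrA, -2 ≤ w.1 ∧ w.1 ≤ 2 ∧ -2 ≤ w.2.1 ∧ w.2.1 ≤ 2 := by decide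

-- cellwise effect of one write
lemma pvCell_setCell (q : List (List Int)) (y x v : Int) (r c : Nat) :
    pvCell (pvSetCell q y x v) r c =
      if y.toNat = r ∧ x.toNat = c then (pvCell q r c).map (fun _ => v)
      else pvCell q r c := by
  unfold pvCell pvSetCell
  rw [List.getElem?_modify]
  cases h : q[r]? with
  | none => simp [h]
  | some row =>
    simp only [h, Option.map_eq_map, Option.map_some, Option.bind_some]
    by_cases hy : y.toNat = r
    · simp only [if_pos hy]
      rw [List.getElem?_set]
      by_cases hx : x.toNat = c
      · subst hx
        simp only [hy, and_self, if_pos trivial, if_true]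
        by_cases hl : x.toNat < row.length
        · simp [hl, List.getElem?_eq_getElem hl]
        · have hnone : row[x.toNat]? = none := List.getElem?_eq_none_iff.mpr (by omega)
          simp [hl, hnone]
      · simp [hx, hy]
    · simp [hy]

-- cellwise effect of a fold of writes: the LAST matching write wins
lemma pvCell_fold_writes (x y : Int) (ws : List (Int × Int × Int))
    (hb : ∀ w ∈ ws, 0 ≤ y + w.1 ∧ 0 ≤ x + w.2.1) (q : List (List Int)) (r c : Nat) :
    pvCell (ws.foldl (pvApplyW x y) q) r c =
      match ws.reverse.find? (fun w => y + w.1 == (r : Int) && x + w.2.1 == (c : Int)) with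
      | some w => (pvCell q r c).map (fun _ => w.2.2)
      | none => pvCell q r c := by
  induction ws generalizing q with
  | nil => simp
  | cons w ws ih =>
    simp only [List.foldl_cons, List.reverse_cons, List.find?_append]
    obtain ⟨h1, h2⟩ := hb w (by simp)
    rw [ih (fun w' hw' => hb w' (by simp [hw']))]
    have hcell : pvCell (pvApplyW x y q w) r c =
        if (y + w.1 == (r : Int) && x + w.2.1 == (c : Int)) then
          (pvCell q r c).map (fun _ => w.2.2)
        else pvCell q r c := by
      rw [pvApplyW, pvCell_setCell]
      by_cases h : (y + w.1 == (r : Int) && x + w.2.1 == (c : Int)) = true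
      · have h' := h; simp only [Bool.and_eq_true, beq_iff_eq] at h'
        rw [if_pos h, if_pos ⟨by omega, by omega⟩]
      · have h' := h; simp only [Bool.and_eq_true, beq_iff_eq, not_and_or] at h'
        rw [if_neg h, if_neg (by rintro ⟨ha, hb'⟩; rcases h' with h' | h' <;> omega)]
    cases hfind : ws.reverse.find? (fun w => y + w.1 == (r : Int) && x + w.2.1 == (c : Int)) with
    | some w' =>
      simp only [hfind, Option.orElse_some]
      rw [hcell]
      by_cases h : (y + w.1 == (r : Int) && x + w.2.1 == (c : Int)) = true
      · simp [h, Option.map_map, Function.comp_def]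
      · simp [h]
    | none =>
      simp only [hfind, Option.orElse_none]
      rw [hcell]
      by_cases h : (y + w.1 == (r : Int) && x + w.2.1 == (c : Int)) = true <;>
        simp [h, List.find?]

-- the last write A makes at an offset within the 5x5 square is the pattern value there
lemma pvWr_find (i j : Int) (h1 : -2 ≤ i) (h2 : i ≤ 2) (h3 : -2 ≤ j) (h4 : j ≤ 2) :
    pvWrA.reverse.find? (fun w => w.1 == i && w.2.1 == j) = some (i, j, pvPat i j) := by
  interval_cases i <;> interval_cases j <;> decide

-- cellwise effect of one whole stamp of A
lemma pvStampA_cell (q : List (List Int)) (p : Int × Int) (hx : 2 ≤ p.1) (hy : 2 ≤ p.2)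
    (r c : Nat) :
    pvCell (pvStampA q p) r c =
      if pvNearb p r c then (pvCell q r c).map (fun _ => pvPat ((r : Int) - p.2) ((c : Int) - p.1))
      else pvCell q r c := by
  obtain ⟨x, y⟩ := p
  simp only at hx hy
  rw [pvStampA_eq_fold,
    pvCell_fold_writes x y pvWrA (fun w hw => by have := pvWr_bounds w hw; omega) q r c]
  have hpred : (fun (w : Int × Int × Int) => y + w.1 == (r : Int) && x + w.2.1 == (c : Int))
      = (fun w => w.1 == (r : Int) - y && w.2.1 == (c : Int) - x) := by
    funext w
    rw [Bool.eq_iff_iff]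
    simp only [Bool.and_eq_true, beq_iff_eq]
    constructor <;> (rintro ⟨u, v⟩; exact ⟨by omega, by omega⟩)
  rw [hpred]
  by_cases hn : pvNearb (x, y) r c
  · have hb : ((r : Int) - y).natAbs ≤ 2 ∧ ((c : Int) - x).natAbs ≤ 2 := by
      have := of_decide_eq_true hn
      exact ⟨le_of_max_le_left this, le_of_max_le_right this⟩
    rw [pvWr_find ((r : Int) - y) ((c : Int) - x) (by omega) (by omega) (by omega) (by omega)]
    simp [hn]
  · rw [List.find?_eq_none.mpr]
    · simp [hn]
    · intro w hw
      have hbnd := pvWr_bounds w (List.mem_reverse.mp hw)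
      have hfar : ¬ (((r : Int) - y).natAbs ≤ 2 ∧ ((c : Int) - x).natAbs ≤ 2) := by
        intro ⟨u, v⟩
        exact hn (decide_eq_true (max_le u v))
      simp only [Bool.and_eq_true, beq_iff_eq]
      rintro ⟨hu, hv⟩
      exact hfar ⟨by omega, by omega⟩

-- one stamp never changes whether a cell exists, so a later constant overwrite commutes
lemma pvStampA_cell_map (q : List (List Int)) (p : Int × Int) (hx : 2 ≤ p.1) (hy : 2 ≤ p.2)
    (r c : Nat) (v : Int) :
    (pvCell (pvStampA q p) r c).map (fun _ => v) = (pvCell q r c).map (fun _ => v) := by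
  rw [pvStampA_cell q p hx hy r c]
  split <;> simp [Option.map_map, Function.comp_def]

-- cellwise effect of A's fold over the places: squares are pairwise disjoint, so the
-- FIRST near centre (if any) determines the cell
lemma pvFold_places_cell (places : List (Int × Int))
    (hge : ∀ p ∈ places, 2 ≤ p.1 ∧ 2 ≤ p.2)
    (hfar : ∀ p1 ∈ places, ∀ p2 ∈ places,
      p1 = p2 ∨ 5 ≤ max (p1.1 - p2.1).natAbs (p1.2 - p2.2).natAbs)
    (q : List (List Int)) (r c : Nat) :
    pvCell (places.foldl pvStampA q) r c =
      match places.find? (fun p => pvNearb p r c) with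
      | some p => (pvCell q r c).map (fun _ => pvPat ((r : Int) - p.2) ((c : Int) - p.1))
      | none => pvCell q r c := by
  induction places generalizing q with
  | nil => simp
  | cons p t ih =>
    obtain ⟨hp1, hp2⟩ := hge p (by simp)
    simp only [List.foldl_cons, List.find?_cons]
    rw [ih (fun p' hp' => hge p' (by simp [hp']))
        (fun p1 h1 p2 h2 => hfar p1 (by simp [h1]) p2 (by simp [h2]))]
    cases hfind : t.find? (fun p' => pvNearb p' r c) with
    | some p' =>
      have hp'mem := List.mem_of_find?_eq_some hfind
      have hp'near := List.find?_some hfind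
      cases hnear : pvNearb p r c with
      | false => simp [pvStampA_cell_map q p hp1 hp2]
      | true =>
        have hpeq : p = p' := by
          rcases hfar p (by simp) p' (by simp [hp'mem]) with h | h
          · exact h
          · exfalso
            have n1 := of_decide_eq_true hnear
            have n2 := of_decide_eq_true hp'near
            rcases le_max_iff.mp h with h5 | h5
            · have u1 := le_of_max_le_right n1
              have u2 := le_of_max_le_right n2
              omega
            · have u1 := le_of_max_le_left n1
              have u2 := le_of_max_le_left n2
              omega
        subst hpeq
        simp [pvStampA_cell_map q p hp1 hp2]
    | none =>
      simp only [pvStampA_cell q p hp1 hp2 r c]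
      cases hnear : pvNearb p r c <;> simp

-- B's scan characterised as find?
lemma pvValueB_find (centers : List (Int × Int)) (r c : Nat) (old : Int) :
    pvValueB centers (r : Int) (c : Int) old =
      match centers.find? (fun p => pvNearb p r c) with
      | some p => pvPat ((r : Int) - p.2) ((c : Int) - p.1)
      | none => old := by
  induction centers with
  | nil => simp [pvValueB]
  | cons p t ih =>
    obtain ⟨x, y⟩ := p
    simp only [pvValueB, List.find?_cons]
    have hcast : max ((((r : Int) - y).natAbs : Int)) ((((c : Int) - x).natAbs : Int))
        = ((max ((r : Int) - y).natAbs ((c : Int) - x).natAbs : Nat) : Int) := by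
      rw [Nat.cast_max]
    rw [hcast]
    cases hnear : pvNearb (x, y) r c with
    | true =>
      have h := of_decide_eq_true hnear
      rw [if_pos (by exact_mod_cast h)]
      have hcond : (((max ((r : Int) - y).natAbs ((c : Int) - x).natAbs : Nat) : Int) == (1 : Int))
          = (max ((r : Int) - y).natAbs ((c : Int) - x).natAbs == (1 : Nat)) := by
        rw [Bool.eq_iff_iff]
        simp only [beq_iff_eq]
        omega
      rw [hcond]
      rfl
    | false =>
      have h := of_decide_eq_false hnear
      rw [if_neg (by simp only [pvNearb] at h ⊢; exact_mod_cast h)]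
      exact ih

-- cellwise effect of rebuilding one row of B
lemma pvStepB_cell (centers : List (Int × Int)) (t : Int) (ht : 0 ≤ t)
    (q : List (List Int)) (r c : Nat) :
    pvCell (q.modify t.toNat (fun row =>
        (PySem.List.enumerate row).map (fun cold => pvValueB centers t cold.1 cold.2))) r c =
      if t = (r : Int) then
        (pvCell q r c).map (fun old => pvValueB centers (r : Int) ((0 : Int) + (c : Int)) old)
      else pvCell q r c := by
  unfold pvCell
  rw [List.getElem?_modify]
  by_cases h : t = (r : Int)
  · have ht' : t.toNat = r := by omega
    subst h
    cases hq : q[r]? with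
    | none => simp [ht']
    | some row =>
      simp only [hq, ht', Option.map_eq_map, Option.map_some, Option.bind_some, if_pos trivial,
        eq_self_iff_true, if_true]
      rw [List.getElem?_map, PySem.List.getElem?_enumerate]
      cases h2 : row[c]? <;> simp
  · have ht' : t.toNat ≠ r := by omega
    cases hq : q[r]? <;> simp [ht', h]

-- cellwise effect of B's fold over the (distinct, nonnegative) touched rows
lemma pvFoldB_cell (centers : List (Int × Int)) (rows : List Int) (hn : rows.Nodup)
    (hpos : ∀ t ∈ rows, 0 ≤ t) (q : List (List Int)) (r c : Nat) :
    pvCell (rows.foldl (fun q t =>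
        q.modify t.toNat (fun row =>
          (PySem.List.enumerate row).map (fun cold => pvValueB centers t cold.1 cold.2))) q) r c =
      if (r : Int) ∈ rows then
        (pvCell q r c).map (fun old => pvValueB centers (r : Int) ((0 : Int) + (c : Int)) old)
      else pvCell q r c := by
  induction rows generalizing q with
  | nil => simp
  | cons t rows ih =>
    rw [List.foldl_cons,
      ih (List.Nodup.of_cons hn) (fun t' ht' => hpos t' (by simp [ht']))]
    by_cases h : t = (r : Int)
    · have hnot : (r : Int) ∉ rows := by
        subst h; exact (List.nodup_cons.mp hn).1
      rw [if_neg hnot, pvStepB_cell centers t (hpos t (by simp)), if_pos h, h,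
        if_pos (by simp)]
    · have hmem : ((r : Int) ∈ t :: rows) ↔ ((r : Int) ∈ rows) := by
        constructor
        · intro hh
          rcases List.mem_cons.mp hh with hh | hh
          · exact absurd hh.symm h
          · exact hh
        · exact fun hh => List.mem_cons_of_mem _ hh
      rw [pvStepB_cell centers t (hpos t (by simp)), if_neg h]
      by_cases h2 : (r : Int) ∈ rows
      · rw [if_pos h2, if_pos (by simp [h2])]
      · rw [if_neg h2, if_neg (by rw [hmem]; exact h2)]

-- membership in the touched rows
lemma pvTouch_mem (centers : List (Int × Int)) (a : Int) :
    a ∈ pvTouchB centers ↔ ∃ p ∈ centers, (a - p.2).natAbs ≤ 2 := by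
  unfold pvTouchB
  rw [PySem.List.mem_sorted, PySem.Set.mem_ofList, List.mem_flatMap]
  constructor
  · rintro ⟨p, hp, hm⟩
    rw [List.mem_map] at hm
    obtain ⟨i, hi, rfl⟩ := hm
    rw [pvRange_m2] at hi
    refine ⟨p, hp, ?_⟩
    have : i = -2 ∨ i = -1 ∨ i = 0 ∨ i = 1 ∨ i = 2 := by simpa using hi
    omega
  · rintro ⟨p, hp, hle⟩
    refine ⟨p, ⟨hp, ?_⟩⟩
    rw [List.mem_map, pvRange_m2]
    exact ⟨a - p.2, by simp; omega, by omega⟩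

lemma pvTouch_nodup (centers : List (Int × Int)) : (pvTouchB centers).Nodup := by
  unfold pvTouchB
  exact (PySem.List.sorted_perm _ _ _).symm.nodup (PySem.Set.nodup_ofList _)

-- one write preserves the grid's shape
lemma pvSetCell_shape (q : List (List Int)) (y x v : Int) (r : Nat) :
    ((pvSetCell q y x v)[r]?).map List.length = (q[r]?).map List.length := by
  unfold pvSetCell
  rw [List.getElem?_modify]
  cases h : q[r]? with
  | none => simp
  | some row => by_cases hy : y.toNat = r <;> simp [hy]

-- a stamp preserves the grid's shape
lemma pvStampA_shape (q : List (List Int)) (p : Int × Int) (r : Nat) :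
    ((pvStampA q p)[r]?).map List.length = (q[r]?).map List.length := by
  obtain ⟨x, y⟩ := p
  rw [pvStampA_eq_fold]
  induction pvWrA generalizing q with
  | nil => rfl
  | cons w ws ih => rw [List.foldl_cons, ih, pvApplyW, pvSetCell_shape]

-- the whole of A preserves the grid's shape
lemma pvFold_places_shape (places : List (Int × Int)) (q : List (List Int)) (r : Nat) :
    ((places.foldl pvStampA q)[r]?).map List.length = (q[r]?).map List.length := by
  induction places generalizing q with
  | nil => rfl
  | cons p t ih => rw [List.foldl_cons, ih, pvStampA_shape]

-- B preserves the grid's shape too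
lemma pvStepB_shape (centers : List (Int × Int)) (t : Int) (q : List (List Int)) (r : Nat) :
    ((q.modify t.toNat (fun row =>
        (PySem.List.enumerate row).map (fun cold => pvValueB centers t cold.1 cold.2)))[r]?).map
        List.length = (q[r]?).map List.length := by
  rw [List.getElem?_modify]
  cases h : q[r]? with
  | none => simp
  | some row => by_cases ht : t.toNat = r <;> simp [ht]

lemma pvAlt_shape (qr : List (List Int)) (version : Int) (r : Nat) :
    ((add_leveling_patterns_alt qr version)[r]?).map List.length = (qr[r]?).map List.length := by
  unfold add_leveling_patterns_alt
  generalize pvTouchB (pvCentersB version) = rows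
  induction rows generalizing qr with
  | nil => rfl
  | cons t rows ih => rw [List.foldl_cons, ih, pvStepB_shape]

-- two grids of the same shape with the same cells are equal
lemma pvGrid_ext (q1 q2 : List (List Int))
    (hshape : ∀ r : Nat, (q1[r]?).map List.length = (q2[r]?).map List.length)
    (hcell : ∀ r c : Nat, pvCell q1 r c = pvCell q2 r c) : q1 = q2 := by
  apply List.ext_getElem?
  intro r
  cases h1 : q1[r]? with
  | none =>
    have := hshape r
    rw [h1] at this
    cases h2 : q2[r]? with
    | none => rfl
    | some row => rw [h2] at this; simp at this
  | some rowA =>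
    have hs := hshape r
    rw [h1] at hs
    cases h2 : q2[r]? with
    | none => rw [h2] at hs; simp at hs
    | some rowB =>
      rw [h2] at hs
      simp only [Option.map_some, Option.some.injEq] at hs
      congr 1
      apply List.ext_getElem?
      intro c
      have := hcell r c
      unfold pvCell at this
      rw [h1, h2] at this
      simpa using this

-- per-version data facts, decided over the (small) coordinate lists
set_option maxRecDepth 100000 in
lemma pvPlaces_eq_centers (version : Int) (h1 : 1 ≤ version) (h2 : version ≤ 40) :
    pvPlacesA version = pvCentersB version := by
  interval_cases version <;> (set_option maxRecDepth 100000 in decide)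

set_option maxRecDepth 100000 in
lemma pvPlaces_mem_coords (version : Int) (h1 : 1 ≤ version) (h2 : version ≤ 40) :
    ∀ p ∈ pvPlacesA version, p.1 ∈ pvCoords version ∧ p.2 ∈ pvCoords version := by
  interval_cases version <;> (set_option maxRecDepth 100000 in decide)

lemma pvCoords_ge6 (version : Int) (h1 : 1 ≤ version) (h2 : version ≤ 40) :
    ∀ a ∈ pvCoords version, 6 ≤ a := by
  interval_cases version <;> (set_option maxRecDepth 100000 in decide)

lemma pvCoords_far (version : Int) (h1 : 1 ≤ version) (h2 : version ≤ 40) :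
    ∀ a ∈ pvCoords version, ∀ b ∈ pvCoords version, a = b ∨ 5 ≤ (a - b).natAbs := by
  interval_cases version <;> (set_option maxRecDepth 100000 in decide)

-- distinct places are Chebyshev-far apart (their 5x5 squares are disjoint)
lemma pvPlaces_far (version : Int) (h1 : 1 ≤ version) (h2 : version ≤ 40) :
    ∀ p1 ∈ pvPlacesA version, ∀ p2 ∈ pvPlacesA version,
      p1 = p2 ∨ 5 ≤ max (p1.1 - p2.1).natAbs (p1.2 - p2.2).natAbs := by
  intro p1 hp1 p2 hp2
  obtain ⟨hx1, hy1⟩ := pvPlaces_mem_coords version h1 h2 p1 hp1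
  obtain ⟨hx2, hy2⟩ := pvPlaces_mem_coords version h1 h2 p2 hp2
  by_cases hx : p1.1 = p2.1
  · by_cases hy : p1.2 = p2.2
    · left; exact Prod.ext hx hy
    · rcases pvCoords_far version h1 h2 p1.2 hy1 p2.2 hy2 with h | h
      · exact absurd h hy
      · right; exact le_max_of_le_right h
  · rcases pvCoords_far version h1 h2 p1.1 hx1 p2.1 hx2 with h | h
    · exact absurd h hx
    · right; exact le_max_of_le_left h

-- ===== VERDICT (by name: the statement is the Claim_ definition above) =====
set_option maxRecDepth 10000 in
theorem add_leveling_patterns_spec : Claim_equal_add_leveling_patterns := by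
  intro qr version _ hpre
  obtain ⟨h1, h2, _, _⟩ := hpre
  unfold Spec_add_leveling_patterns
  have hge : ∀ p ∈ pvPlacesA version, 2 ≤ p.1 ∧ 2 ≤ p.2 := by
    intro p hp
    obtain ⟨hx, hy⟩ := pvPlaces_mem_coords version h1 h2 p hp
    exact ⟨by have := pvCoords_ge6 version h1 h2 p.1 hx; omega,
           by have := pvCoords_ge6 version h1 h2 p.2 hy; omega⟩
  apply pvGrid_ext
  · intro r
    rw [pvAlt_shape]
    exact pvFold_places_shape (pvPlacesA version) qr r
  · intro r c
    unfold add_leveling_patterns add_leveling_patterns_alt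
    have hy6 : ∀ p ∈ pvCentersB version, 6 ≤ p.2 := by
      intro p hp
      rw [← pvPlaces_eq_centers version h1 h2] at hp
      exact pvCoords_ge6 version h1 h2 p.2 (pvPlaces_mem_coords version h1 h2 p hp).2
    rw [pvFold_places_cell (pvPlacesA version) hge (pvPlaces_far version h1 h2) qr r c,
      pvFoldB_cell (pvCentersB version) (pvTouchB (pvCentersB version))
        (pvTouch_nodup _)
        (fun t ht => by
          obtain ⟨p, hp, hle⟩ := (pvTouch_mem _ t).mp ht
          have := hy6 p hp
          omega) qr r c,
      pvPlaces_eq_centers version h1 h2]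
    by_cases htouch : (r : Int) ∈ pvTouchB (pvCentersB version)
    · rw [if_pos htouch]
      cases hfind : (pvCentersB version).find? (fun p => pvNearb p r c) with
      | some p =>
        simp only
        cases hc : pvCell qr r c with
        | none => simp
        | some old => simp [pvValueB_find, hfind]
      | none =>
        simp only
        cases hc : pvCell qr r c with
        | none => simp
        | some old => simp [pvValueB_find, hfind]
    · rw [if_neg htouch, List.find?_eq_none.mpr]
      intro p hp hnear
      apply htouch
      rw [pvTouch_mem]
      exact ⟨p, hp, le_of_max_le_left (of_decide_eq_true hnear)⟩
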